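-- pv_equiv track=rewrite | github.com/ddri/banjo-midison | src/banjo/voicings.py | _drop_n_from_top
-- ===== SOURCE A (Python) =====
-- def _drop_n_from_top(notes: list[int], positions: list[int]) -> list[int]:
--     """
--     Drop the Nth-from-top voices down an octave. positions is 1-indexed:
--     position 1 = topmost note, 2 = second from top, etc.
--     """
--     if len(notes) < 2:
--         return notes
--     notes = list(notes)
--     for pos in positions:
--         idx = len(notes) - pos
--         if 0 <= idx < len(notes):
--             notes[idx] -= 12
--     return sorted(notes)
-- ===== SOURCE B (Python) =====
-- def _drop_n_from_top(notes: list[int], positions: list[int]) -> list[int]: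
--     """
--     Drop the Nth-from-top voices down an octave. positions is 1-indexed:
--     position 1 = topmost note, 2 = second from top, etc.
--     """
--     if len(notes) < 2:
--         return notes
--     n = len(notes)
--     return sorted(x - 12 * positions.count(n - i) for i, x in enumerate(notes))
-- ===== Notes on version B (the rewrite author's own statement) =====
-- stated objective: simpler
-- what changed: A copies the list and scatters: for each position it computes an index, range-checks it, and subtracts 12 in place; B gathers: for each note index i it directly counts occurrences of n-i in positions (the range check disappears because position n-i is automatically valid) and emits the adjusted note in one comprehension, then sorts.
import Mathlib
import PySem

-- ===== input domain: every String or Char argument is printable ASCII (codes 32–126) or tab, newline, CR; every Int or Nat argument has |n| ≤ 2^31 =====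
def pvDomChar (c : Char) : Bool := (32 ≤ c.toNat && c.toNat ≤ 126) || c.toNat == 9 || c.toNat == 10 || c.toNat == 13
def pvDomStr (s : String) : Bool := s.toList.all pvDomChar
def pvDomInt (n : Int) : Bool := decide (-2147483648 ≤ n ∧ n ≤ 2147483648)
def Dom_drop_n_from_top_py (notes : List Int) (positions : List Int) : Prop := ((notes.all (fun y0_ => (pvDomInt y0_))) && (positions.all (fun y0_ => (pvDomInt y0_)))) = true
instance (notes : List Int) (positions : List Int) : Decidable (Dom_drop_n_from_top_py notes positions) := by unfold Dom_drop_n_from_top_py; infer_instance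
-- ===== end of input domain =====

-- B replaces A's position-driven in-place scatter (index computation + range check +
-- in-place subtraction per position) by a note-driven gather: for each note index i it
-- counts positions equal to n-i directly — the range check disappears — and emits the
-- adjusted note in one comprehension before sorting (objective: simpler).

-- ===== PORT A =====
-- one iteration of A's `for pos in positions` loop on the copied list
def dropA_step (acc : List Int) (pos : Int) : List Int :=
  if 0 ≤ (acc.length : Int) - pos ∧ (acc.length : Int) - pos < (acc.length : Int) then
    PySem.List.pySetD acc ((acc.length : Int) - pos)
      (PySem.List.pyGetD acc ((acc.length : Int) - pos) 0 - 12)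
  else acc

def drop_n_from_top_py (notes : List Int) (positions : List Int) : List Int :=
  if notes.length < 2 then notes
  else PySem.List.sorted (positions.foldl dropA_step notes) (fun x => x) false

-- ===== PORT B =====
def drop_n_from_top_py_alt (notes : List Int) (positions : List Int) : List Int :=
  if notes.length < 2 then notes
  else
    let n : Int := (notes.length : Int)
    PySem.List.sorted
      ((PySem.List.enumerate notes).map
        (fun q => q.2 - 12 * (PySem.List.count positions (n - q.1) : Int)))
      (fun x => x) false

-- ===== PRECONDITION & SPEC =====
def Spec_drop_n_from_top_py (notes : List Int) (positions : List Int) (out : List Int) : Prop := out = drop_n_from_top_py_alt notes positions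
instance (notes : List Int) (positions : List Int) (out : List Int) : Decidable (Spec_drop_n_from_top_py notes positions out) := by unfold Spec_drop_n_from_top_py; infer_instance

-- ===== CLAIM (what is proved, stated in full; the proofs are below) =====
def Claim_equal_drop_n_from_top_py : Prop := ∀ (notes : List Int) (positions : List Int), Dom_drop_n_from_top_py notes positions → Spec_drop_n_from_top_py notes positions (drop_n_from_top_py notes positions)

-- ===== LEMMAS AND PROOFS =====

theorem dropA_step_pos (acc : List Int) (p : Int)
    (hv : 0 ≤ (acc.length : Int) - p ∧ (acc.length : Int) - p < (acc.length : Int)) :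
    dropA_step acc p =
      acc.set ((acc.length : Int) - p).toNat
        (acc[((acc.length : Int) - p).toNat]'(by omega) - 12) := by
  unfold dropA_step
  rw [if_pos hv, PySem.List.pySetD_of_nonneg acc _ hv.1,
    PySem.List.pyGetD_eq_getElem acc 0 hv.1 hv.2]

theorem dropA_step_neg (acc : List Int) (p : Int)
    (hv : ¬ (0 ≤ (acc.length : Int) - p ∧ (acc.length : Int) - p < (acc.length : Int))) :
    dropA_step acc p = acc := by
  unfold dropA_step
  rw [if_neg hv]

theorem length_dropA_step (acc : List Int) (p : Int) :
    (dropA_step acc p).length = acc.length := by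
  by_cases hv : 0 ≤ (acc.length : Int) - p ∧ (acc.length : Int) - p < (acc.length : Int)
  · rw [dropA_step_pos acc p hv, List.length_set]
  · rw [dropA_step_neg acc p hv]

-- A's loop, characterised: after processing ps, entry j holds acc[j] - 12 * (#hits on j)
theorem foldA_eq_mapIdx (ps : List Int) : ∀ (acc : List Int),
    ps.foldl dropA_step acc =
      acc.mapIdx (fun j x =>
        x - 12 * (ps.countP (fun p => decide ((acc.length : Int) - p = (j : Int))) : Int)) := by
  induction ps with
  | nil =>
    intro acc
    simp only [List.foldl_nil, List.countP_nil]
    apply List.ext_getElem (by simp)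
    intro j h1 h2
    simp
  | cons p ps ih =>
    intro acc
    have hlen : (dropA_step acc p).length = acc.length := length_dropA_step acc p
    rw [List.foldl_cons, ih (dropA_step acc p)]
    apply List.ext_getElem (by simp [hlen])
    intro j h1 h2
    have hj : j < acc.length := by simpa using h2
    rw [List.getElem_mapIdx, List.getElem_mapIdx, List.countP_cons]
    simp only [hlen]
    by_cases hv : 0 ≤ (acc.length : Int) - p ∧ (acc.length : Int) - p < (acc.length : Int)
    · simp only [dropA_step_pos acc p hv]
      rw [List.getElem_set]
      by_cases he : ((acc.length : Int) - p).toNat = j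
      · have heq : (acc.length : Int) - p = (j : Int) := by omega
        simp only [if_pos, heq, decide_true]
        rw [if_pos (by simp : ((j : Int)).toNat = j)]
        simp only [Int.toNat_natCast]
        push_cast
        ring
      · have hne : ¬ ((acc.length : Int) - p = (j : Int)) := by omega
        simp only [he, if_false, hne, decide_false]
        push_cast
        ring
    · simp only [dropA_step_neg acc p hv]
      have hne : ¬ ((acc.length : Int) - p = (j : Int)) := by
        intro h; exact hv ⟨by omega, by omega⟩
      simp only [hne, decide_false]
      push_cast
      ring

-- B's direct count of positions equal to n - j equals A's count of positions aimed at j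
theorem count_eq_countP_aim (ps : List Int) (n : Int) (j : Nat) :
    (PySem.List.count ps (n - (j : Int)) : Int)
      = (ps.countP (fun p => decide (n - p = (j : Int))) : Int) := by
  rw [PySem.List.count_eq, List.count_eq_countP]
  congr 1
  apply List.countP_congr
  intro p _
  by_cases h : p = n - (j : Int)
  · have h2 : n - p = (j : Int) := by omega
    simp [h, h2]
  · have : ¬ (n - p = (j : Int)) := by omega
    simp [h, this]

theorem drop_n_eq (notes positions : List Int) :
    drop_n_from_top_py notes positions = drop_n_from_top_py_alt notes positions := by
  unfold drop_n_from_top_py drop_n_from_top_py_alt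
  by_cases h2 : notes.length < 2
  · simp [h2]
  · simp only [h2, if_false]
    congr 1
    rw [foldA_eq_mapIdx]
    apply List.ext_getElem (by simp [PySem.List.length_enumerate])
    intro j h1 hj2
    have hj : j < notes.length := by simpa using h1
    rw [List.getElem_mapIdx, List.getElem_map,
      PySem.List.getElem_enumerate notes 0 j (by simpa [PySem.List.length_enumerate] using hj)]
    simp only [zero_add]
    rw [count_eq_countP_aim positions (notes.length : Int) j]

-- ===== VERDICT (by name: the statement is the Claim_ definition above) =====
theorem drop_n_from_top_py_spec : Claim_equal_drop_n_from_top_py := by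
  intro notes positions _
  unfold Spec_drop_n_from_top_py
  exact drop_n_eq notes positions
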